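-- pv_equiv track=rewrite | github.com/jeckhard/arXiv | CleanData.py | cleanCategories
-- ===== SOURCE A (Python) =====
-- def cleanCategories(categories):
--     """
--     Cleans arXiv categories to 'cs', 'physics', 'math' and 'other'
--
--     :param categories: str
--         string containing all raw categories
--     :return: set of str elements
--         cleaned categories
--     """
--
--     categoryList = categories.split(" ")
--     physics = {"astro-ph", "cond-mat", "gr-qc", "hep-ex", "hep-lat", "hep-ph", "hep-th", "math-ph", "nlin", "nucl-ex","nucl-th", "physics", "quant-ph"}
--     labels = {"cs", "math", "physics"}
--
--
--     categorySet=set()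
--
--     for category in categoryList:
--         if "." in category:
--             index = category.index(".")
--             category = category[:index]
--         if category in physics:
--             categorySet.add("physics")
--         elif category in labels:
--             categorySet.add(category)
--         else:
--             categorySet.add("other")
--
--     return categorySet
-- ===== SOURCE B (Python) =====
-- def cleanCategories(categories):
--     """
--     Cleans arXiv categories to 'cs', 'physics', 'math' and 'other'
--
--     :param categories: str
--     :return: set of str elements
--     """
--     physics = {"astro-ph", "cond-mat", "gr-qc", "hep-ex", "hep-lat", "hep-ph", "hep-th",
--                "math-ph", "nlin", "nucl-ex", "nucl-th", "physics", "quant-ph"}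
--
--     def label(prefix):
--         if prefix in physics:
--             return "physics"
--         return prefix if prefix in ("cs", "math") else "other"
--
--     # single character-level scan: no split(), no index()/slicing; the prefix of the
--     # current token is accumulated until a '.' (then the rest of the token is skipped)
--     # and classified when a ' ' delimiter or the end of the string is reached
--     result = set()
--     cur = []
--     skipping = False
--     for ch in categories:
--         if ch == ' ':
--             result.add(label(''.join(cur)))
--             cur = []
--             skipping = False
--         elif not skipping:
--             if ch == '.':
--                 skipping = True
--             else:
--                 cur.append(ch)
--     result.add(label(''.join(cur)))
--     return result
-- ===== Notes on version B (the rewrite author's own statement) =====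
-- stated objective: alternative
-- what changed: Replaces split-into-tokens + per-token '.'-index slicing and membership branches by a single character-level streaming scanner that accumulates each token's pre-dot prefix (skipping the remainder after a '.') and classifies it at each space delimiter and at end of string.
import Mathlib
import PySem

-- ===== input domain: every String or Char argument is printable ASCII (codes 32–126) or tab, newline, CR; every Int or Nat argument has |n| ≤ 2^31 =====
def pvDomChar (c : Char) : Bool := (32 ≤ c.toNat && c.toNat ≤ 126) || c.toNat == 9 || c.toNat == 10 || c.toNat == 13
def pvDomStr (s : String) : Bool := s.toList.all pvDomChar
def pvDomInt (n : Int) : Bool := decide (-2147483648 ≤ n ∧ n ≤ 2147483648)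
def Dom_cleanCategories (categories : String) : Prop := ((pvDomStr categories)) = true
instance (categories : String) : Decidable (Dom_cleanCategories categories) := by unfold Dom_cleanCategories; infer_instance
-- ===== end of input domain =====

-- B replaces A's split-into-tokens + per-token '.'-index slicing and membership branching by a
-- single character-level streaming scanner that accumulates each token's pre-dot prefix and
-- classifies it at each space delimiter; same O(n) cost, a different traversal of the input.


-- ===== PORT A =====
def pvPhysics : PySem.Set String :=
  PySem.Set.ofList ["astro-ph", "cond-mat", "gr-qc", "hep-ex", "hep-lat", "hep-ph", "hep-th",
                    "math-ph", "nlin", "nucl-ex", "nucl-th", "physics", "quant-ph"]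

def pvLabelsA : PySem.Set String := PySem.Set.ofList ["cs", "math", "physics"]

def cleanCategories (categories : String) : List String :=
  -- categories.split(" "): the separator is the nonempty literal " ", so split? is some (.getD [] unreachable)
  let categoryList := (PySem.Str.split? categories " ").getD []
  categoryList.foldl
    (fun categorySet category =>
      -- if "." in category: category = category[:category.index(".")] — index = find, exact since "." is present
      let category :=
        if PySem.Str.isIn "." category then
          PySem.Str.slice category none (some (PySem.Str.find category "."))
        else category
      if PySem.Set.contains pvPhysics category then PySem.Set.add categorySet "physics"
      else if PySem.Set.contains pvLabelsA category then PySem.Set.add categorySet category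
      else PySem.Set.add categorySet "other")
    PySem.Set.empty

-- ===== PORT B =====
def pvPhysicsB : PySem.Set String :=
  PySem.Set.ofList ["astro-ph", "cond-mat", "gr-qc", "hep-ex", "hep-lat", "hep-ph", "hep-th",
                    "math-ph", "nlin", "nucl-ex", "nucl-th", "physics", "quant-ph"]

-- def label(prefix): "physics" if prefix in physics else (prefix if prefix in ("cs","math") else "other")
def pvLabel (pfx : String) : String :=
  if PySem.Set.contains pvPhysicsB pfx then "physics"
  else if pfx == "cs" || pfx == "math" then pfx
  else "other"

-- the character loop: state (cur, skipping, result); classify at ' ' and at end of string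
def pvScan : List Char → List Char → Bool → PySem.Set String → PySem.Set String
  | [], cur, _, result => PySem.Set.add result (pvLabel (String.ofList cur))
  | ch :: rest, cur, skipping, result =>
    if ch = ' ' then pvScan rest [] false (PySem.Set.add result (pvLabel (String.ofList cur)))
    else if skipping then pvScan rest cur skipping result     -- elif not skipping: (nothing in the skipping case)
    else if ch = '.' then pvScan rest cur true result
    else pvScan rest (cur ++ [ch]) skipping result            -- cur.append(ch)

def cleanCategories_alt (categories : String) : List String :=
  pvScan categories.toList [] false PySem.Set.empty

-- ===== PRECONDITION & SPEC =====
def Spec_cleanCategories (categories : String) (out : List String) : Prop := out = cleanCategories_alt categories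
instance (categories : String) (out : List String) : Decidable (Spec_cleanCategories categories out) := by unfold Spec_cleanCategories; infer_instance

-- ===== CLAIM (what is proved, stated in full; the proofs are below) =====
def Claim_equal_cleanCategories : Prop := ∀ (categories : String), Dom_cleanCategories categories → Spec_cleanCategories categories (cleanCategories categories)

-- ===== LEMMAS AND PROOFS =====

-- structural description of splitting a char list at the spaces
def pvSplitSp : List Char → List (List Char)
  | [] => [[]]
  | c :: r => if c = ' ' then [] :: pvSplitSp r else (pvSplitSp r).modifyHead (c :: ·)

lemma pv_modifyHead_id' {α : Type} (l : List α) : l.modifyHead (fun x => x) = l := by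
  cases l <;> rfl

lemma pvSplitSp_ne_nil (l : List Char) : pvSplitSp l ≠ [] := by
  cases l with
  | nil => simp [pvSplitSp]
  | cons c r =>
    simp only [pvSplitSp]
    split
    · simp
    · cases h : pvSplitSp r with
      | nil => exact absurd h (pvSplitSp_ne_nil r)
      | cons a b => simp

-- PySem.Chars.splitOn.go with separator " " computes pvSplitSp
lemma pv_splitOn_go_sp (fuel : Nat) (l cur : List Char) (acc : List (List Char))
    (hf : l.length ≤ fuel) :
    PySem.Chars.splitOn.go [' '] fuel l cur acc =
      acc.reverse ++ (pvSplitSp l).modifyHead (cur.reverse ++ ·) := by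
  induction fuel generalizing l cur acc with
  | zero =>
    have : l = [] := List.length_eq_zero_iff.mp (Nat.le_zero.mp hf)
    subst this; simp [PySem.Chars.splitOn.go, pvSplitSp]
  | succ f ih =>
    cases l with
    | nil => simp [PySem.Chars.splitOn.go, pvSplitSp]
    | cons c rest =>
      by_cases hc : c = ' '
      · subst hc
        have hpre : List.isPrefixOf [' '] (' ' :: rest) = true := by simp [List.isPrefixOf]
        have := ih rest [] (cur.reverse :: acc) (by simpa using hf)
        simp [PySem.Chars.splitOn.go, hpre, pvSplitSp, this, pv_modifyHead_id']
      · have hpre : List.isPrefixOf [' '] (c :: rest) = false := by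
          simp [List.isPrefixOf, Ne.symm hc]
        have := ih rest (c :: cur) acc (by simpa using hf)
        rw [show PySem.Chars.splitOn.go [' '] (f+1) (c :: rest) cur acc
              = PySem.Chars.splitOn.go [' '] f rest (c :: cur) acc by
            simp [PySem.Chars.splitOn.go, hpre], this]
        simp only [pvSplitSp, if_neg hc]
        cases h : pvSplitSp rest with
        | nil => exact absurd h (pvSplitSp_ne_nil rest)
        | cons a b => simp

lemma pv_splitOn_sp (cs : List Char) :
    PySem.Chars.splitOn cs [' '] = pvSplitSp cs := by
  have := pv_splitOn_go_sp (cs.length + 1) cs [] [] (by omega)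
  simpa [PySem.Chars.splitOn, pv_modifyHead_id'] using this

-- Chars.find.go on the single-character needle '.': offset of the first '.', else -1
lemma pv_find_go_dot (l : List Char) (k : Nat) :
    PySem.Chars.find.go ['.'] l k =
      if '.' ∈ l then ((k : Int) + ((l.takeWhile (· ≠ '.')).length : Int)) else -1 := by
  induction l generalizing k with
  | nil => simp [PySem.Chars.find.go]
  | cons c rest ih =>
    by_cases hc : c = '.'
    · subst hc; simp [PySem.Chars.find.go, List.isPrefixOf]
    · simp [PySem.Chars.find.go, List.isPrefixOf, hc, ih (k + 1), Ne.symm hc]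
      split <;> omega

lemma pv_find_dot (cs : List Char) :
    PySem.Chars.find cs ['.'] =
      if '.' ∈ cs then (((cs.takeWhile (· ≠ '.')).length : Nat) : Int) else -1 := by
  simpa using pv_find_go_dot cs 0

-- A's conditional strip-at-'.' equals the takeWhile prefix
lemma pv_strip_eq (t : String) :
    (if PySem.Str.isIn "." t then
        PySem.Str.slice t none (some (PySem.Str.find t "."))
     else t) = String.ofList (t.toList.takeWhile (· ≠ '.')) := by
  by_cases hin : '.' ∈ t.toList
  · have hfind : PySem.Str.find t "." = ((t.toList.takeWhile (· ≠ '.')).length : Int) := by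
      rw [show PySem.Str.find t "." = PySem.Chars.find t.toList ['.'] from rfl, pv_find_dot]
      simp [hin]
    have hisin : PySem.Str.isIn "." t = true := by
      rw [show PySem.Str.isIn "." t = (PySem.Chars.find t.toList ['.'] != -1) from rfl, pv_find_dot]
      simp [hin]
    rw [if_pos hisin, hfind]
    apply String.toList_inj.mp
    rw [PySem.Str.toList_slice, String.toList_ofList,
      show PySem.Chars.slice t.toList none (some ((t.toList.takeWhile (· ≠ '.')).length : Int))
        = PySem.List.slice t.toList none (some ((t.toList.takeWhile (· ≠ '.')).length : Int)) from rfl,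
      PySem.List.slice_to_natCast]
    exact (List.prefix_iff_eq_take.mp (List.takeWhile_prefix _)).symm
  · have hisin : PySem.Str.isIn "." t = false := by
      rw [show PySem.Str.isIn "." t = (PySem.Chars.find t.toList ['.'] != -1) from rfl, pv_find_dot]
      simp [hin]
    rw [if_neg (by rw [hisin]; exact Bool.false_ne_true)]
    have : t.toList.takeWhile (· ≠ '.') = t.toList :=
      List.takeWhile_eq_self_iff.mpr (by intro x hx; simp; exact fun h => hin (h ▸ hx))
    rw [this, String.ofList_toList]

-- A's membership branching equals B's label function
lemma pv_class_eq (categorySet : PySem.Set String) (c : String) :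
    (if PySem.Set.contains pvPhysics c then PySem.Set.add categorySet "physics"
     else if PySem.Set.contains pvLabelsA c then PySem.Set.add categorySet c
     else PySem.Set.add categorySet "other") = PySem.Set.add categorySet (pvLabel c) := by
  by_cases hp : PySem.Set.contains pvPhysics c
  · rw [if_pos hp]
    rw [show pvLabel c = "physics" by
      unfold pvLabel; rw [if_pos (show PySem.Set.contains pvPhysicsB c = true from hp)]]
  · rw [if_neg hp]
    have hnp : c ≠ "physics" := by
      intro h; exact hp (by subst h; rfl)
    by_cases hc : c = "cs"
    · subst hc; rfl
    by_cases hm : c = "math"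
    · subst hm; rfl
    · have hmem : c ∉ pvLabelsA := by
        have h : pvLabelsA = ["cs", "math", "physics"] := rfl
        simp [h, hc, hm, hnp]
      have : pvLabel c = "other" := by
        unfold pvLabel
        rw [if_neg (show ¬ PySem.Set.contains pvPhysicsB c = true from hp)]
        simp [hc, hm]
      simp [hmem, this]

-- the scanner computes the fold of pvLabel over the pre-dot prefixes of the space-separated tokens
lemma pvScan_spec (cs : List Char) : ∀ (cur : List Char) (skipping : Bool) (result : PySem.Set String),
    pvScan cs cur skipping result =
      List.foldl (fun a p => PySem.Set.add a (pvLabel (String.ofList p))) result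
        (((pvSplitSp cs).map (·.takeWhile (· ≠ '.'))).modifyHead
          (fun p => cur ++ if skipping then [] else p)) := by
  induction cs with
  | nil => intro cur skipping result; cases skipping <;> simp [pvScan, pvSplitSp]
  | cons c rest ih =>
    intro cur skipping result
    by_cases hc : c = ' '
    · subst hc
      rw [show pvScan (' ' :: rest) cur skipping result
            = pvScan rest [] false (PySem.Set.add result (pvLabel (String.ofList cur))) by
          simp [pvScan]]
      rw [ih]
      cases skipping <;>
        simp [pvSplitSp, pv_modifyHead_id', List.takeWhile_nil]
    · have hsplit : pvSplitSp (c :: rest) = (pvSplitSp rest).modifyHead (c :: ·) := by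
        simp [pvSplitSp, hc]
      obtain ⟨t0, r, hr⟩ : ∃ t0 r, pvSplitSp rest = t0 :: r := by
        cases h : pvSplitSp rest with
        | nil => exact absurd h (pvSplitSp_ne_nil rest)
        | cons a b => exact ⟨a, b, rfl⟩
      cases skipping with
      | true =>
        rw [show pvScan (c :: rest) cur true result = pvScan rest cur true result by
            simp [pvScan, hc]]
        rw [ih]
        simp [hsplit, hr]
      | false =>
        by_cases hd : c = '.'
        · subst hd
          rw [show pvScan ('.' :: rest) cur false result = pvScan rest cur true result by
              simp [pvScan, hc]]
          rw [ih]
          simp [hsplit, hr]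
        · rw [show pvScan (c :: rest) cur false result
                = pvScan rest (cur ++ [c]) false result by
              simp [pvScan, hc, hd]]
          rw [ih]
          simp [hsplit, hr, hd]

-- ===== VERDICT (by name: the statement is the Claim_ definition above) =====
theorem cleanCategories_spec : Claim_equal_cleanCategories := by
  intro categories _
  unfold Spec_cleanCategories cleanCategories cleanCategories_alt
  rw [pvScan_spec]
  have hsplit : (PySem.Str.split? categories " ").getD []
      = (pvSplitSp categories.toList).map String.ofList := by
    rw [show (PySem.Str.split? categories " ").getD []
          = (PySem.Chars.splitOn categories.toList [' ']).map String.ofList by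
        simp [PySem.Str.split?, PySem.Chars.split?]]
    rw [pv_splitOn_sp]
  rw [hsplit, List.foldl_map]
  have hbody :
      (fun (categorySet : PySem.Set String) (category : List Char) =>
        (fun categorySet (category : String) =>
          let category :=
            if PySem.Str.isIn "." category then
              PySem.Str.slice category none (some (PySem.Str.find category "."))
            else category
          if PySem.Set.contains pvPhysics category then PySem.Set.add categorySet "physics"
          else if PySem.Set.contains pvLabelsA category then PySem.Set.add categorySet category
          else PySem.Set.add categorySet "other") categorySet (String.ofList category))
      = (fun (a : PySem.Set String) (t : List Char) =>
          PySem.Set.add a (pvLabel (String.ofList (t.takeWhile (· ≠ '.'))))) := by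
    funext a t
    simp only [pv_strip_eq, String.toList_ofList, pv_class_eq]
  rw [hbody]
  simp [pv_modifyHead_id', List.foldl_map]
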